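-- pv_equiv track=rewrite | github.com/OuluBSD/SuperShader | process_ui_shaders.py | identify_ui_2d_patterns
-- ===== SOURCE A (Python) =====
-- def identify_ui_2d_patterns(shader_code):
--     """
--     Identify common UI/2D graphics patterns in shader code.
--
--     Args:
--         shader_code (str): GLSL code to analyze
--
--     Returns:
--         dict: Dictionary of identified UI/2D patterns
--     """
--     patterns = {
--         # Basic 2D shapes
--         'rectangle_draw': 'rect' in shader_code.lower() or 'box' in shader_code.lower(),
--         'circle_draw': 'circle' in shader_code.lower() or 'round' in shader_code.lower(),
--         'line_draw': 'line' in shader_code.lower(),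
--         'triangle_draw': 'triangle' in shader_code.lower(),
--         'ellipse_draw': 'ellipse' in shader_code.lower(),
--
--         # UI elements
--         'button_draw': 'button' in shader_code.lower(),
--         'panel_draw': 'panel' in shader_code.lower(),
--         'window_draw': 'window' in shader_code.lower(),
--         'menu_draw': 'menu' in shader_code.lower(),
--         'icon_draw': 'icon' in shader_code.lower(),
--
--         # Graphics operations
--         'gradient_fill': 'gradient' in shader_code.lower(),
--         'linear_gradient': 'linear' in shader_code.lower() and 'gradient' in shader_code.lower(),
--         'radial_gradient': 'radial' in shader_code.lower() and 'gradient' in shader_code.lower(),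
--         'antialiasing': 'anti' in shader_code.lower() and 'alias' in shader_code.lower(),
--         'stroke_draw': 'stroke' in shader_code.lower(),
--         'fill_draw': 'fill' in shader_code.lower(),
--
--         # Text rendering
--         'text_render': 'text' in shader_code.lower(),
--         'font_render': 'font' in shader_code.lower(),
--         'glyph_render': 'glyph' in shader_code.lower(),
--
--         # Effects
--         'shadow_effect': 'shadow' in shader_code.lower(),
--         'outline_effect': 'outline' in shader_code.lower(),
--         'blur_effect': 'blur' in shader_code.lower(),
--
--         # Transformations
--         'coordinate_transform': 'coord' in shader_code.lower() or 'transform' in shader_code.lower(),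
--         'positioning': 'pos' in shader_code.lower(),
--
--         # Pixel operations
--         'pixel_shader': 'frag' in shader_code.lower() or 'pixel' in shader_code.lower(),
--         'color_blend': 'blend' in shader_code.lower(),
--         'alpha_composite': 'alpha' in shader_code.lower() and 'comp' in shader_code.lower(),
--     }
--
--     # Filter only the patterns that were found
--     active_patterns = {k: v for k, v in patterns.items() if v}
--     return active_patterns
-- ===== SOURCE B (Python) =====
-- # Different algorithm: one left-to-right scan over the lowered text acts as a
-- # multi-pattern matcher, collecting the SET of keywords that occur anywhere
-- # (kw is found iff it starts at some position i); each pattern is then a DNF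
-- # formula (list of alternative conjunctions) evaluated against that found-set.
--
-- KEYWORDS = ['rect', 'box', 'circle', 'round', 'line', 'triangle', 'ellipse',
--             'button', 'panel', 'window', 'menu', 'icon', 'gradient', 'linear',
--             'radial', 'anti', 'alias', 'stroke', 'fill', 'text', 'font',
--             'glyph', 'shadow', 'outline', 'blur', 'coord', 'transform', 'pos',
--             'frag', 'pixel', 'blend', 'alpha', 'comp']
--
-- PATTERN_DNF = [
--     ('rectangle_draw', [['rect'], ['box']]),
--     ('circle_draw', [['circle'], ['round']]),
--     ('line_draw', [['line']]),
--     ('triangle_draw', [['triangle']]),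
--     ('ellipse_draw', [['ellipse']]),
--     ('button_draw', [['button']]),
--     ('panel_draw', [['panel']]),
--     ('window_draw', [['window']]),
--     ('menu_draw', [['menu']]),
--     ('icon_draw', [['icon']]),
--     ('gradient_fill', [['gradient']]),
--     ('linear_gradient', [['linear', 'gradient']]),
--     ('radial_gradient', [['radial', 'gradient']]),
--     ('antialiasing', [['anti', 'alias']]),
--     ('stroke_draw', [['stroke']]),
--     ('fill_draw', [['fill']]),
--     ('text_render', [['text']]),
--     ('font_render', [['font']]),
--     ('glyph_render', [['glyph']]),
--     ('shadow_effect', [['shadow']]),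
--     ('outline_effect', [['outline']]),
--     ('blur_effect', [['blur']]),
--     ('coordinate_transform', [['coord'], ['transform']]),
--     ('positioning', [['pos']]),
--     ('pixel_shader', [['frag'], ['pixel']]),
--     ('color_blend', [['blend']]),
--     ('alpha_composite', [['alpha', 'comp']]),
-- ]
--
--
-- def identify_ui_2d_patterns(shader_code):
--     low = shader_code.lower()
--     found = set()
--     for i in range(len(low)):
--         for kw in KEYWORDS:
--             if low.startswith(kw, i):
--                 found.add(kw)
--     result = {}
--     for name, groups in PATTERN_DNF:
--         if any(all(kw in found for kw in conj) for conj in groups):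
--             result[name] = True
--     return result
-- ===== Notes on version B (the rewrite author's own statement) =====
-- stated objective: alternative
-- what changed: Instead of A's ~30 independent substring membership searches, B does one left-to-right scan of the lowered text as a multi-pattern matcher, collecting the set of keywords that start at some position, and then evaluates each pattern as a DNF formula (alternatives of conjunctions) over that found-keyword set.
import Mathlib
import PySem

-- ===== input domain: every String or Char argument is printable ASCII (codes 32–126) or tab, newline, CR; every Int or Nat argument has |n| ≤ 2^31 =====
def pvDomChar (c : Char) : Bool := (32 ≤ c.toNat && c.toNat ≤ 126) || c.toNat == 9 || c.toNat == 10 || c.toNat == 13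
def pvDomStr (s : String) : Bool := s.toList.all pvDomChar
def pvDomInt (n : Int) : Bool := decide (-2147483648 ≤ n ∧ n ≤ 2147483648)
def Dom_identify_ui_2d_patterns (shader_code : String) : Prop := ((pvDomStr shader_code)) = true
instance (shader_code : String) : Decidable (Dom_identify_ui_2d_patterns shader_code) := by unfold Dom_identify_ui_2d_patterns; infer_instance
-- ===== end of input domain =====

-- B replaces A's ~30 independent substring searches by one position scan collecting the set of
-- found keywords, then evaluates each pattern as a DNF formula over that set (objective: alternative).


-- ===== PORT A =====
-- A's dict literal has pairwise-distinct keys, so it is the association list written in order;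
-- the filtering dict comprehension is List.filter.
def identify_ui_2d_patterns (shader_code : String) : List (String × Bool) :=
  let patterns : List (String × Bool) := [
    ("rectangle_draw", PySem.Str.isIn "rect" (PySem.Str.lower shader_code) || PySem.Str.isIn "box" (PySem.Str.lower shader_code)),
    ("circle_draw", PySem.Str.isIn "circle" (PySem.Str.lower shader_code) || PySem.Str.isIn "round" (PySem.Str.lower shader_code)),
    ("line_draw", PySem.Str.isIn "line" (PySem.Str.lower shader_code)),
    ("triangle_draw", PySem.Str.isIn "triangle" (PySem.Str.lower shader_code)),
    ("ellipse_draw", PySem.Str.isIn "ellipse" (PySem.Str.lower shader_code)),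
    ("button_draw", PySem.Str.isIn "button" (PySem.Str.lower shader_code)),
    ("panel_draw", PySem.Str.isIn "panel" (PySem.Str.lower shader_code)),
    ("window_draw", PySem.Str.isIn "window" (PySem.Str.lower shader_code)),
    ("menu_draw", PySem.Str.isIn "menu" (PySem.Str.lower shader_code)),
    ("icon_draw", PySem.Str.isIn "icon" (PySem.Str.lower shader_code)),
    ("gradient_fill", PySem.Str.isIn "gradient" (PySem.Str.lower shader_code)),
    ("linear_gradient", PySem.Str.isIn "linear" (PySem.Str.lower shader_code) && PySem.Str.isIn "gradient" (PySem.Str.lower shader_code)),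
    ("radial_gradient", PySem.Str.isIn "radial" (PySem.Str.lower shader_code) && PySem.Str.isIn "gradient" (PySem.Str.lower shader_code)),
    ("antialiasing", PySem.Str.isIn "anti" (PySem.Str.lower shader_code) && PySem.Str.isIn "alias" (PySem.Str.lower shader_code)),
    ("stroke_draw", PySem.Str.isIn "stroke" (PySem.Str.lower shader_code)),
    ("fill_draw", PySem.Str.isIn "fill" (PySem.Str.lower shader_code)),
    ("text_render", PySem.Str.isIn "text" (PySem.Str.lower shader_code)),
    ("font_render", PySem.Str.isIn "font" (PySem.Str.lower shader_code)),
    ("glyph_render", PySem.Str.isIn "glyph" (PySem.Str.lower shader_code)),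
    ("shadow_effect", PySem.Str.isIn "shadow" (PySem.Str.lower shader_code)),
    ("outline_effect", PySem.Str.isIn "outline" (PySem.Str.lower shader_code)),
    ("blur_effect", PySem.Str.isIn "blur" (PySem.Str.lower shader_code)),
    ("coordinate_transform", PySem.Str.isIn "coord" (PySem.Str.lower shader_code) || PySem.Str.isIn "transform" (PySem.Str.lower shader_code)),
    ("positioning", PySem.Str.isIn "pos" (PySem.Str.lower shader_code)),
    ("pixel_shader", PySem.Str.isIn "frag" (PySem.Str.lower shader_code) || PySem.Str.isIn "pixel" (PySem.Str.lower shader_code)),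
    ("color_blend", PySem.Str.isIn "blend" (PySem.Str.lower shader_code)),
    ("alpha_composite", PySem.Str.isIn "alpha" (PySem.Str.lower shader_code) && PySem.Str.isIn "comp" (PySem.Str.lower shader_code))]
  patterns.filter (fun kv => kv.2)

-- ===== PORT B =====
def pvKeywords : List String := ["rect", "box", "circle", "round", "line", "triangle", "ellipse",
  "button", "panel", "window", "menu", "icon", "gradient", "linear", "radial", "anti", "alias",
  "stroke", "fill", "text", "font", "glyph", "shadow", "outline", "blur", "coord", "transform",
  "pos", "frag", "pixel", "blend", "alpha", "comp"]

def pvPatternDNF : List (String × List (List String)) := [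
  ("rectangle_draw", [["rect"], ["box"]]),
  ("circle_draw", [["circle"], ["round"]]),
  ("line_draw", [["line"]]),
  ("triangle_draw", [["triangle"]]),
  ("ellipse_draw", [["ellipse"]]),
  ("button_draw", [["button"]]),
  ("panel_draw", [["panel"]]),
  ("window_draw", [["window"]]),
  ("menu_draw", [["menu"]]),
  ("icon_draw", [["icon"]]),
  ("gradient_fill", [["gradient"]]),
  ("linear_gradient", [["linear", "gradient"]]),
  ("radial_gradient", [["radial", "gradient"]]),
  ("antialiasing", [["anti", "alias"]]),
  ("stroke_draw", [["stroke"]]),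
  ("fill_draw", [["fill"]]),
  ("text_render", [["text"]]),
  ("font_render", [["font"]]),
  ("glyph_render", [["glyph"]]),
  ("shadow_effect", [["shadow"]]),
  ("outline_effect", [["outline"]]),
  ("blur_effect", [["blur"]]),
  ("coordinate_transform", [["coord"], ["transform"]]),
  ("positioning", [["pos"]]),
  ("pixel_shader", [["frag"], ["pixel"]]),
  ("color_blend", [["blend"]]),
  ("alpha_composite", [["alpha", "comp"]])]

-- the scan loop: 'for i in range(len(low)): for kw in KEYWORDS: if low.startswith(kw, i): found.add(kw)'
-- (range(n) over nonnegative indices is List.range n; low.startswith(kw, i) with 0 ≤ i ≤ len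
--  is exactly Chars.startswith on (low.drop i))
def pvFoundSet (low : List Char) : PySem.Set String :=
  (List.range low.length).foldl (fun f i =>
    pvKeywords.foldl (fun f kw =>
      if PySem.Chars.startswith (low.drop i) kw.toList then PySem.Set.add f kw else f) f)
    PySem.Set.empty

-- Source B's result dict: keys (the DNF table's names) are pairwise distinct, so each
-- 'result[name] = True' appends the pair in table order.
def identify_ui_2d_patterns_alt (shader_code : String) : List (String × Bool) :=
  let low := (PySem.Str.lower shader_code).toList
  let found := pvFoundSet low
  pvPatternDNF.foldl (fun acc e =>
    if e.2.any (fun conj => conj.all (fun kw => PySem.Set.contains found kw)) then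
      acc ++ [(e.1, true)]
    else acc) []

-- ===== PRECONDITION & SPEC =====
def Spec_identify_ui_2d_patterns (shader_code : String) (out : List (String × Bool)) : Prop := out = identify_ui_2d_patterns_alt shader_code
instance (shader_code : String) (out : List (String × Bool)) : Decidable (Spec_identify_ui_2d_patterns shader_code out) := by unfold Spec_identify_ui_2d_patterns; infer_instance

-- ===== CLAIM (what is proved, stated in full; the proofs are below) =====
def Claim_equal_identify_ui_2d_patterns : Prop := ∀ (shader_code : String), Dom_identify_ui_2d_patterns shader_code → Spec_identify_ui_2d_patterns shader_code (identify_ui_2d_patterns shader_code)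

-- ===== LEMMAS AND PROOFS =====

-- membership in the inner keyword fold
theorem mem_inner_fold (kws : List String) (P : String → Bool) (f : PySem.Set String) (x : String) :
    x ∈ kws.foldl (fun f kw => if P kw then PySem.Set.add f kw else f) f ↔
      x ∈ f ∨ (x ∈ kws ∧ P x = true) := by
  induction kws generalizing f with
  | nil => simp
  | cons kw rest ih =>
    simp only [List.foldl_cons, ih, List.mem_cons]
    by_cases h : P kw = true
    · simp only [h, if_true, PySem.Set.mem_add]
      constructor
      · rintro ((hf | rfl) | ⟨hr, hp⟩)
        · tauto
        · tauto
        · tauto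
      · rintro (hf | ⟨(rfl | hr), hp⟩) <;> tauto
    · simp only [Bool.not_eq_true] at h
      simp only [h, Bool.false_eq_true, if_false]
      constructor
      · rintro (hf | ⟨hr, hp⟩) <;> tauto
      · rintro (hf | ⟨(rfl | hr), hp⟩)
        · tauto
        · rw [h] at hp; cases hp
        · tauto

-- membership in the position-scan fold
theorem mem_scan_fold (low : List Char) (n : Nat) (f0 : PySem.Set String) (x : String) :
    x ∈ (List.range n).foldl (fun f i =>
        pvKeywords.foldl (fun f kw =>
          if PySem.Chars.startswith (low.drop i) kw.toList then PySem.Set.add f kw else f) f) f0 ↔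
      x ∈ f0 ∨ (x ∈ pvKeywords ∧ ∃ i < n, PySem.Chars.startswith (low.drop i) x.toList = true) := by
  induction n generalizing f0 with
  | zero => simp
  | succ n ih =>
    rw [List.range_succ, List.foldl_append, List.foldl_cons, List.foldl_nil, mem_inner_fold, ih]
    constructor
    · rintro ((hf | ⟨hk, hi⟩) | ⟨hk, hs⟩)
      · exact Or.inl hf
      · exact Or.inr ⟨hk, hi.elim fun i ⟨h1, h2⟩ => ⟨i, Nat.lt_succ_of_lt h1, h2⟩⟩
      · exact Or.inr ⟨hk, ⟨n, Nat.lt_succ_self n, hs⟩⟩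
    · rintro (hf | ⟨hk, i, hi, hs⟩)
      · exact Or.inl (Or.inl hf)
      · rcases Nat.lt_succ_iff_lt_or_eq.mp hi with h | rfl
        · exact Or.inl (Or.inr ⟨hk, i, h, hs⟩)
        · exact Or.inr ⟨hk, hs⟩

-- the scanned found-set holds exactly the (nonempty) keywords occurring as substrings
theorem contains_foundSet (low : List Char) (kw : String)
    (hmem : kw ∈ pvKeywords) (hne : kw.toList ≠ []) :
    PySem.Set.contains (pvFoundSet low) kw = PySem.Chars.isIn kw.toList low := by
  rw [Bool.eq_iff_iff, PySem.Set.contains_iff, ← PySem.Chars.exists_prefix_drop_iff_isIn]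
  unfold pvFoundSet
  rw [mem_scan_fold]
  constructor
  · rintro (hf | ⟨_, i, _, hs⟩)
    · simp [PySem.Set.empty] at hf
    · exact ⟨i, (PySem.Chars.startswith_iff _ _).mp hs⟩
  · rintro ⟨j, hj⟩
    refine Or.inr ⟨hmem, j, ?_, (PySem.Chars.startswith_iff _ _).mpr hj⟩
    by_contra hge
    rw [List.drop_eq_nil_of_le (Nat.le_of_not_lt hge)] at hj
    exact hne (List.prefix_nil.mp hj)

-- Filtering an association list by its Boolean value yields exactly the (key, true) pairs, kept in order.
theorem filter_snd_eq_flatMap (l : List (String × Bool)) :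
    l.filter (fun kv => kv.2) = l.flatMap (fun kv => if kv.2 then [(kv.1, true)] else []) := by
  induction l with
  | nil => rfl
  | cons kv rest ih =>
    obtain ⟨k, b⟩ := kv
    cases b <;> simp [ih]

-- Selecting by a predicate and renaming each kept entry is the same order-preserving flatMap.
theorem map_filter_eq_flatMap {α β : Type} (p : α → Bool) (f : α → β) (l : List α) :
    (l.filter p).map f = l.flatMap (fun e => if p e then [f e] else []) := by
  induction l with
  | nil => rfl
  | cons x rest ih =>
    by_cases h : p x <;> simp [h, ih]

-- ===== VERDICT (by name: the statement is the Claim_ definition above) =====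
theorem identify_ui_2d_patterns_spec : Claim_equal_identify_ui_2d_patterns := by
  intro s _
  show identify_ui_2d_patterns s = identify_ui_2d_patterns_alt s
  have hne : ∀ kw ∈ pvKeywords, kw.toList ≠ [] := by decide
  have hc : ∀ kw ∈ pvKeywords,
      (kw ∈ pvFoundSet (PySem.Chars.lower s.toList))
        ↔ PySem.Chars.isIn kw.toList (PySem.Chars.lower s.toList) = true := fun kw hm => by
    rw [← PySem.Set.contains_iff, contains_foundSet _ kw hm (hne kw hm)]
  simp only [identify_ui_2d_patterns, identify_ui_2d_patterns_alt]
  rw [filter_snd_eq_flatMap,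
      PySem.List.foldl_append_if
        (fun e : String × List (List String) =>
          e.2.any (fun conj => conj.all (fun kw =>
            PySem.Set.contains (pvFoundSet ((PySem.Str.lower s).toList)) kw)))
        (fun e => (e.1, true)) pvPatternDNF [],
      map_filter_eq_flatMap]
  simp [pvPatternDNF, pvKeywords, hc]
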